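-- pv_equiv track=rewrite | github.com/maroquio/DefaultWebApp | util/paginacao_util.py | _calcular_paginas_visiveis
-- ===== SOURCE A (Python) =====
-- def _calcular_paginas_visiveis(pagina_atual: int, total_paginas: int, max_botoes: int = 7) -> list:
--     """
--     Calcula quais números de página exibir na barra de navegação.
--
--     Retorna lista com números de página e None para reticências (...).
--     Exemplo: [1, None, 4, 5, 6, None, 10]
--     """
--     if total_paginas <= max_botoes:
--         return list(range(1, total_paginas + 1))
--
--     paginas = []
--     metade = max_botoes // 2
--
--     # Sempre mostrar primeira e última página
--     inicio = max(2, pagina_atual - metade)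
--     fim = min(total_paginas - 1, pagina_atual + metade)
--
--     # Ajustar janela se estiver perto das bordas
--     if pagina_atual - metade <= 1:
--         fim = max_botoes - 2
--     if pagina_atual + metade >= total_paginas:
--         inicio = total_paginas - max_botoes + 3
--
--     paginas.append(1)
--     if inicio > 2:
--         paginas.append(None)  # Reticências
--     for p in range(inicio, fim + 1):
--         paginas.append(p)
--     if fim < total_paginas - 1:
--         paginas.append(None)  # Reticências
--     paginas.append(total_paginas)
--
--     return paginas
-- ===== SOURCE B (Python) =====
-- def _calcular_paginas_visiveis(pagina_atual: int, total_paginas: int, max_botoes: int = 7) -> list: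
--     """Same pagination bar, computed as a table: the bar's length and each cell
--     are given by an arithmetic index formula, and the list is one comprehension
--     over range(n) instead of a sequence of conditional appends."""
--     if total_paginas <= max_botoes:
--         return [p + 1 for p in range(max(0, total_paginas))]
--
--     metade = max_botoes // 2
--     inicio = max(2, pagina_atual - metade)
--     fim = min(total_paginas - 1, pagina_atual + metade)
--     if pagina_atual - metade <= 1:
--         fim = max_botoes - 2
--     if pagina_atual + metade >= total_paginas:
--         inicio = total_paginas - max_botoes + 3
--
--     gl = 1 if inicio > 2 else 0                 # left ellipsis present?
--     gr = 1 if fim < total_paginas - 1 else 0    # right ellipsis present?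
--     w = max(0, fim + 1 - inicio)                # window width
--     n = 2 + gl + w + gr                         # bar length
--
--     def cell(k):
--         if k == 0:
--             return 1
--         if k == n - 1:
--             return total_paginas
--         if gl == 1 and k == 1:
--             return None
--         if gr == 1 and k == n - 2:
--             return None
--         return inicio + (k - 1 - gl)
--
--     return [cell(k) for k in range(n)]
-- ===== Notes on version B (the rewrite author's own statement) =====
-- stated objective: alternative
-- what changed: B computes the bar as a table: it derives the bar length n and a per-index arithmetic cell formula (first page, optional ellipsis slots, shifted window, last page) and materialises the list as one comprehension over range(n), instead of A's sequential conditional appends and ascending for-loop.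
import Mathlib
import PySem

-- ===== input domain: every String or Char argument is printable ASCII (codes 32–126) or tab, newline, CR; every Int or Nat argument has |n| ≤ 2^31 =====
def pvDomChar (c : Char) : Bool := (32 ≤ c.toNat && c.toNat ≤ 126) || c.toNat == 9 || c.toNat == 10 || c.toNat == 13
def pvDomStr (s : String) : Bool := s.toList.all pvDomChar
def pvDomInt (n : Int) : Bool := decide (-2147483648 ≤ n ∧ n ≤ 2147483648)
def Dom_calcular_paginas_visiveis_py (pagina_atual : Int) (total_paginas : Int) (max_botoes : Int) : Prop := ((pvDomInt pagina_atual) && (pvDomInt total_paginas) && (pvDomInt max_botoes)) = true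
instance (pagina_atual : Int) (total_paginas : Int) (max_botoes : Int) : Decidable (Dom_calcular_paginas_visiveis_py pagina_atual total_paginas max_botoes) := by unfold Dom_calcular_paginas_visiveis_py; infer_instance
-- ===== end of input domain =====

-- B builds the pagination bar as a table — bar length n and a per-index arithmetic cell
-- formula, materialised by one comprehension over range(n) — instead of A's sequential
-- conditional appends; same cost, alternative decomposition.

-- ===== PORT A =====
def calcular_paginas_visiveis_py (pagina_atual : Int) (total_paginas : Int) (max_botoes : Int) : List (Option Int) :=
  if total_paginas ≤ max_botoes then
    (PySem.List.pyRange 1 (total_paginas + 1) 1).map some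
  else
    let metade := PySem.Int.floordiv max_botoes 2
    let inicio := max 2 (pagina_atual - metade)
    let fim := min (total_paginas - 1) (pagina_atual + metade)
    let fim := if pagina_atual - metade ≤ 1 then max_botoes - 2 else fim
    let inicio := if pagina_atual + metade ≥ total_paginas then total_paginas - max_botoes + 3 else inicio
    let paginas : List (Option Int) := [] ++ [some 1]
    let paginas := if inicio > 2 then paginas ++ [none] else paginas
    let paginas := (PySem.List.pyRange inicio (fim + 1) 1).foldl (fun acc p => acc ++ [some p]) paginas
    let paginas := if fim < total_paginas - 1 then paginas ++ [none] else paginas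
    paginas ++ [some total_paginas]

-- ===== PORT B =====
-- Source B's local 'cell(k)': the arithmetic formula for the bar's k-th entry
def pvCell (total_paginas inicio gl gr n : Int) (k : Int) : Option Int :=
  if k = 0 then some 1
  else if k = n - 1 then some total_paginas
  else if gl = 1 ∧ k = 1 then none
  else if gr = 1 ∧ k = n - 2 then none
  else some (inicio + (k - 1 - gl))

def calcular_paginas_visiveis_py_alt (pagina_atual : Int) (total_paginas : Int) (max_botoes : Int) : List (Option Int) :=
  if total_paginas ≤ max_botoes then
    (PySem.List.pyRange 0 (max 0 total_paginas) 1).map (fun p => some (p + 1))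
  else
    let metade := PySem.Int.floordiv max_botoes 2
    let inicio := max 2 (pagina_atual - metade)
    let fim := min (total_paginas - 1) (pagina_atual + metade)
    let fim := if pagina_atual - metade ≤ 1 then max_botoes - 2 else fim
    let inicio := if pagina_atual + metade ≥ total_paginas then total_paginas - max_botoes + 3 else inicio
    let gl : Int := if inicio > 2 then 1 else 0
    let gr : Int := if fim < total_paginas - 1 then 1 else 0
    let w : Int := max 0 (fim + 1 - inicio)
    let n : Int := 2 + gl + w + gr
    (PySem.List.pyRange 0 n 1).map (fun k => pvCell total_paginas inicio gl gr n k)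

-- ===== PRECONDITION & SPEC =====
def Spec_calcular_paginas_visiveis_py (pagina_atual : Int) (total_paginas : Int) (max_botoes : Int) (out : List (Option Int)) : Prop := out = calcular_paginas_visiveis_py_alt pagina_atual total_paginas max_botoes
instance (pagina_atual : Int) (total_paginas : Int) (max_botoes : Int) (out : List (Option Int)) : Decidable (Spec_calcular_paginas_visiveis_py pagina_atual total_paginas max_botoes out) := by unfold Spec_calcular_paginas_visiveis_py; infer_instance

-- ===== CLAIM =====
def Claim_equal_calcular_paginas_visiveis_py : Prop := ∀ (pagina_atual : Int) (total_paginas : Int) (max_botoes : Int), Dom_calcular_paginas_visiveis_py pagina_atual total_paginas max_botoes → Spec_calcular_paginas_visiveis_py pagina_atual total_paginas max_botoes (calcular_paginas_visiveis_py pagina_atual total_paginas max_botoes)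

-- ===== LEMMAS AND PROOFS =====

-- the middle indices of the table produce exactly the (shifted) ascending window
theorem map_pvCell_window (tp i gl gr n s e : Int)
    (hgl : 0 ≤ gl) (hgr : 0 ≤ gr) (hs : 1 + gl ≤ s) (he : e + gr ≤ n - 1) :
    (PySem.List.pyRange s e 1).map (fun k => pvCell tp i gl gr n k)
      = (PySem.List.pyRange (i + s - 1 - gl) (i + e - 1 - gl) 1).map some := by
  by_cases h : s < e
  · rw [PySem.List.pyRange_one_cons h, PySem.List.pyRange_one_cons (show i + s - 1 - gl < i + e - 1 - gl by omega)]
    simp only [List.map_cons]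
    congr 1
    · unfold pvCell; split_ifs <;> first | (exfalso; omega) | (congr 1; omega)
    · have := map_pvCell_window tp i gl gr n (s + 1) e hgl hgr (by omega) he
      rw [this, show i + (s + 1) - 1 - gl = i + s - 1 - gl + 1 by ring]
  · rw [PySem.List.pyRange_one_eq_nil (by omega),
        PySem.List.pyRange_one_eq_nil (show i + e - 1 - gl ≤ i + s - 1 - gl by omega)]
    simp
termination_by (e - s).toNat
decreasing_by omega

-- normalising the clamped window width back to the raw bounds
theorem window_norm (i f : Int) :
    PySem.List.pyRange i (i + max 0 (f + 1 - i)) 1 = PySem.List.pyRange i (f + 1) 1 := by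
  by_cases h : i ≤ f + 1
  · congr 1; omega
  · rw [PySem.List.pyRange_one_eq_nil (by omega), PySem.List.pyRange_one_eq_nil (by omega)]

-- the whole table equals A's five concatenated pieces (window width W generalized)
theorem bar_core (tp i gl gr W : Int) (hW : 0 ≤ W) (hgl : gl = 0 ∨ gl = 1) (hgr : gr = 0 ∨ gr = 1) :
    (PySem.List.pyRange 0 (2 + gl + W + gr) 1).map (fun k => pvCell tp i gl gr (2 + gl + W + gr) k)
      = [some 1] ++ (if gl = 1 then [none] else []) ++ (PySem.List.pyRange i (i + W) 1).map some
          ++ (if gr = 1 then [none] else []) ++ [some tp] := by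
  have hn : (0:Int) < 2 + gl + W + gr := by omega
  rw [PySem.List.pyRange_one_cons hn]
  simp only [zero_add]
  rw [PySem.List.pyRange_one_append 1 (1 + gl) (2 + gl + W + gr) (by omega) (by omega)]
  rw [PySem.List.pyRange_one_append (1 + gl) (1 + gl + W) (2 + gl + W + gr) (by omega) (by omega)]
  rw [PySem.List.pyRange_one_append (1 + gl + W) (1 + gl + W + gr) (2 + gl + W + gr) (by omega) (by omega)]
  have hlast : PySem.List.pyRange (1 + gl + W + gr) (2 + gl + W + gr) 1 = [1 + gl + W + gr] := by
    have := PySem.List.pyRange_one_singleton (1 + gl + W + gr)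
    rw [show (1 + gl + W + gr) + 1 = 2 + gl + W + gr by ring] at this
    exact this
  rw [hlast]
  simp only [List.map_cons, List.map_append]
  have hmid := map_pvCell_window tp i gl gr (2 + gl + W + gr) (1 + gl) (1 + gl + W)
      (by omega) (by omega) (by omega) (by omega)
  rw [hmid, show i + (1 + gl) - 1 - gl = i by ring, show i + (1 + gl + W) - 1 - gl = i + W by ring]
  have h0 : pvCell tp i gl gr (2 + gl + W + gr) 0 = some 1 := by
    unfold pvCell; split_ifs <;> first | rfl | (exfalso; omega)
  have hend : pvCell tp i gl gr (2 + gl + W + gr) (1 + gl + W + gr) = some tp := by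
    unfold pvCell; split_ifs <;> first | rfl | (exfalso; omega)
  rw [h0, hend]
  rcases hgl with hgl | hgl <;> rcases hgr with hgr | hgr <;> subst hgl <;> subst hgr
  · rw [PySem.List.pyRange_one_eq_nil (show (1:Int) + 0 ≤ 1 by omega),
        PySem.List.pyRange_one_eq_nil (show (1:Int) + 0 + W + 0 ≤ 1 + 0 + W by omega)]
    simp
  · rw [PySem.List.pyRange_one_eq_nil (show (1:Int) + 0 ≤ 1 by omega)]
    have : PySem.List.pyRange (1 + 0 + W) (1 + 0 + W + 1) 1 = [1 + 0 + W] :=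
      PySem.List.pyRange_one_singleton _
    rw [this]
    have : pvCell tp i 0 1 (2 + 0 + W + 1) (1 + 0 + W) = none := by
      unfold pvCell; split_ifs <;> first | rfl | (exfalso; omega)
    simp_all
  · have h1 : PySem.List.pyRange 1 (1 + 1) 1 = [1] := PySem.List.pyRange_one_singleton 1
    rw [h1, PySem.List.pyRange_one_eq_nil (show (1:Int) + 1 + W + 0 ≤ 1 + 1 + W by omega)]
    have : pvCell tp i 1 0 (2 + 1 + W + 0) 1 = none := by
      unfold pvCell; split_ifs <;> first | rfl | (exfalso; omega)
    simp_all
  · have h1 : PySem.List.pyRange 1 (1 + 1) 1 = [1] := PySem.List.pyRange_one_singleton 1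
    have h2 : PySem.List.pyRange (1 + 1 + W) (1 + 1 + W + 1) 1 = [1 + 1 + W] :=
      PySem.List.pyRange_one_singleton _
    rw [h1, h2]
    have c1 : pvCell tp i 1 1 (2 + 1 + W + 1) 1 = none := by
      unfold pvCell; split_ifs <;> first | rfl | (exfalso; omega)
    have c2 : pvCell tp i 1 1 (2 + 1 + W + 1) (1 + 1 + W) = none := by
      unfold pvCell; split_ifs <;> first | rfl | (exfalso; omega)
    simp_all

-- ===== VERDICT =====
theorem calcular_paginas_visiveis_py_spec : Claim_equal_calcular_paginas_visiveis_py := by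
  intro pagina_atual total_paginas max_botoes _
  unfold Spec_calcular_paginas_visiveis_py
  unfold calcular_paginas_visiveis_py calcular_paginas_visiveis_py_alt
  by_cases h : total_paginas ≤ max_botoes
  · simp only [h, if_pos]
    rw [PySem.List.pyRange_one, PySem.List.pyRange_one]
    rw [show (total_paginas + 1 - 1).toNat = (max 0 total_paginas - 0).toNat by omega]
    simp only [List.map_map]
    exact List.map_congr_left (fun k _ => by simp [Function.comp]; ring_nf)
  · simp only [h, if_neg, not_false_iff]
    generalize (if pagina_atual + PySem.Int.floordiv max_botoes 2 ≥ total_paginas then total_paginas - max_botoes + 3 else max 2 (pagina_atual - PySem.Int.floordiv max_botoes 2)) = i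
    generalize (if pagina_atual - PySem.Int.floordiv max_botoes 2 ≤ 1 then max_botoes - 2 else min (total_paginas - 1) (pagina_atual + PySem.Int.floordiv max_botoes 2)) = f
    rw [PySem.List.foldl_append_singleton_eq_map]
    rw [← window_norm i f]
    rw [bar_core total_paginas i (if i > 2 then 1 else 0) (if f < total_paginas - 1 then 1 else 0)
          (max 0 (f + 1 - i)) (by omega) (by split_ifs <;> simp) (by split_ifs <;> simp)]
    split_ifs <;> simp_all
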